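-- pv_equiv track=rewrite | github.com/othmananas47/Uni-Code-Written | API(NON_OOP).py | public_limited_company_checker
-- ===== SOURCE A (Python) =====
-- def public_limited_company_checker(list_of_companies):
--     plc_count = 0
--     for company in list_of_companies:
--         if "PLC" in company['company_name']:
--             plc_count+=1
--             public_limited_company = company
--
--     if plc_count == 0:
--         raise Exception("None of the Companies in the List contained PLC")
--
--     return public_limited_company
-- ===== SOURCE B (Python) =====
-- def public_limited_company_checker(list_of_companies):
--     for company in reversed(list_of_companies):
--         if "PLC" in company['company_name']:
--             return company
--     raise Exception("None of the Companies in the List contained PLC")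
-- ===== Notes on version B (the rewrite author's own statement) =====
-- stated objective: simpler
-- what changed: Scans the list in reverse and returns the first match immediately, replacing the counter and last-wins reassignment loop.
import Mathlib
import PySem

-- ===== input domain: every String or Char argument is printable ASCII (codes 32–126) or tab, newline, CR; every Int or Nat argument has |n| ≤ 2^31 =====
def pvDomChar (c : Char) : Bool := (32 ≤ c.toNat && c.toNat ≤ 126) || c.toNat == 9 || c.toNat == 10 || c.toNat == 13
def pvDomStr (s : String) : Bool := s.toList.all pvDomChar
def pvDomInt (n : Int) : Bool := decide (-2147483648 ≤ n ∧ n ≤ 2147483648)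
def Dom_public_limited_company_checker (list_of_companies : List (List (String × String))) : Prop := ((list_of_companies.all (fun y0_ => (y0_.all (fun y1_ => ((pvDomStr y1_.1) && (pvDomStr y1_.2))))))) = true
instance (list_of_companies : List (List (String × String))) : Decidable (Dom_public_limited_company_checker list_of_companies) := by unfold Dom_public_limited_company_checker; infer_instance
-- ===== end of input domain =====

-- B scans the list in reverse and returns the first match immediately (simpler: no counter, no last-wins reassignment).

-- ===== PORT A =====
-- company['company_name'] (dict = assoc list, first match; missing key raises KeyError — excluded by Pre_)
def pvNameA (company : List (String × String)) : String :=
  (((company.find? (fun p => p.1 == "company_name")).map (·.2)).getD "")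

-- one iteration of A's loop body: state is (plc_count, public_limited_company as an Option for 'not yet assigned')
def pvStepA (st : Int × Option (List (String × String))) (company : List (String × String)) :
    Int × Option (List (String × String)) :=
  if PySem.Str.isIn "PLC" (pvNameA company) then (st.1 + 1, some company) else st

def pvLoopA (list_of_companies : List (List (String × String))) :
    Int × Option (List (String × String)) :=
  list_of_companies.foldl pvStepA (0, none)

def public_limited_company_checker (list_of_companies : List (List (String × String))) : List (String × String) :=
  let st := pvLoopA list_of_companies
  if st.1 == 0 then []        -- Python raises Exception here; excluded by Pre_
  else st.2.getD []

-- ===== PORT B =====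
def pvNameB (company : List (String × String)) : String :=
  (((company.find? (fun p => p.1 == "company_name")).map (·.2)).getD "")

-- 'for company in reversed(list_of_companies): if "PLC" in …: return company'
def pvScanB : List (List (String × String)) → List (String × String)
  | [] => []                  -- Python raises Exception here; excluded by Pre_
  | company :: rest =>
      if PySem.Str.isIn "PLC" (pvNameB company) then company else pvScanB rest

def public_limited_company_checker_alt (list_of_companies : List (List (String × String))) : List (String × String) :=
  pvScanB list_of_companies.reverse

-- ===== PRECONDITION & SPEC =====
-- Pre_ excludes exactly the inputs where A raises: a company dict without the
-- 'company_name' key (KeyError) or no company name containing "PLC" (Exception).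
def Pre_public_limited_company_checker (list_of_companies : List (List (String × String))) : Prop :=
  (list_of_companies.all (fun c => c.any (fun p => p.1 == "company_name"))) = true ∧
  (list_of_companies.any (fun c =>
      PySem.Str.isIn "PLC" ((((c.find? (fun p => p.1 == "company_name")).map (·.2)).getD "")))) = true
instance (list_of_companies : List (List (String × String))) : Decidable (Pre_public_limited_company_checker list_of_companies) := by unfold Pre_public_limited_company_checker; infer_instance

def pvWitness_public_limited_company_checker : (List (List (String × String))) :=
  [[("company_name", "Acme PLC"), ("city", "London")]]

def Spec_public_limited_company_checker (list_of_companies : List (List (String × String))) (out : List (String × String)) : Prop := out = public_limited_company_checker_alt list_of_companies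
instance (list_of_companies : List (List (String × String))) (out : List (String × String)) : Decidable (Spec_public_limited_company_checker list_of_companies out) := by unfold Spec_public_limited_company_checker; infer_instance

-- ===== CLAIM (what is proved, stated in full; the proofs are below) =====
def Claim_equal_public_limited_company_checker : Prop := ∀ (list_of_companies : List (List (String × String))), Dom_public_limited_company_checker list_of_companies → Pre_public_limited_company_checker list_of_companies → Spec_public_limited_company_checker list_of_companies (public_limited_company_checker list_of_companies)

-- ===== LEMMAS AND PROOFS =====

-- the test both loops make on a company, as one named predicate
def pvHas (c : List (String × String)) : Bool := PySem.Str.isIn "PLC" (pvNameB c)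

theorem pvScanB_cons (c : List (String × String)) (rest : List (List (String × String))) :
    pvScanB (c :: rest) = if pvHas c then c else pvScanB rest := rfl

theorem pvStepA_eq (st : Int × Option (List (String × String))) (c : List (String × String)) :
    pvStepA st c = if pvHas c then (st.1 + 1, some c) else st := rfl

-- B's reverse scan on xs ++ ys: first match in xs wins, else scan ys
theorem pvScanB_append (xs ys : List (List (String × String))) :
    pvScanB (xs ++ ys) = if xs.any pvHas then pvScanB xs else pvScanB ys := by
  induction xs with
  | nil => simp
  | cons c rest ih =>
      rw [List.cons_append, pvScanB_cons, pvScanB_cons, List.any_cons]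
      cases hc : pvHas c with
      | true => simp
      | false => simp [ih]

-- A's loop from any state: a match makes the option B's answer on the reverse and bumps the count
theorem pvFoldA_spec (l : List (List (String × String))) (st : Int × Option (List (String × String))) :
    l.foldl pvStepA st
      = if l.any pvHas
        then ((l.foldl pvStepA st).1, some (pvScanB l.reverse))
        else st := by
  induction l generalizing st with
  | nil => simp
  | cons c rest ih =>
      rw [List.foldl_cons, List.any_cons, List.reverse_cons, pvScanB_append, List.any_reverse,
        ih (pvStepA st c)]
      cases hc : pvHas c with
      | true =>
          cases hr : rest.any pvHas with
          | true => simp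
          | false =>
              have h1 : pvStepA st c = (st.1 + 1, some c) := by rw [pvStepA_eq, hc]; simp
              simp [hc, h1, pvScanB_cons]
      | false =>
          have h1 : pvStepA st c = st := by rw [pvStepA_eq, hc]; simp
          cases hr : rest.any pvHas with
          | true => simp [h1]
          | false => simp [h1]

-- with a match somewhere, the count ends positive
theorem pvFoldA_count_pos (l : List (List (String × String))) (st : Int × Option (List (String × String)))
    (hst : 0 ≤ st.1) (hl : l.any pvHas = true) : 0 < (l.foldl pvStepA st).1 := by
  induction l generalizing st with
  | nil => simp at hl
  | cons c rest ih =>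
      rw [List.foldl_cons]
      rw [List.any_cons] at hl
      cases hc : pvHas c with
      | true =>
          have h1 : (pvStepA st c).1 = st.1 + 1 := by rw [pvStepA_eq, hc]; simp
          cases hr : rest.any pvHas with
          | true => exact ih _ (by omega)  hr
          | false =>
              have := pvFoldA_spec rest (pvStepA st c)
              rw [hr] at this
              simp only [Bool.false_eq_true, if_false] at this
              rw [this, h1]; omega
      | false =>
          have hst' : pvStepA st c = st := by rw [pvStepA_eq, hc]; simp
          rw [hst']
          simp only [hc, Bool.false_or] at hl
          exact ih st hst hl

-- ===== VERDICT (by name: the statement is the Claim_ definition above) =====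
theorem public_limited_company_checker_spec : Claim_equal_public_limited_company_checker := by
  intro l _ hpre
  unfold Spec_public_limited_company_checker
  obtain ⟨-, hany⟩ := hpre
  have hany' : l.any pvHas = true := hany
  unfold public_limited_company_checker public_limited_company_checker_alt pvLoopA
  have h := pvFoldA_spec l (0, none)
  rw [hany'] at h
  simp only [if_pos] at h
  have hcnt := pvFoldA_count_pos l (0, none) (by norm_num) hany'
  rw [h]
  simp only []
  have : ¬ ((l.foldl pvStepA (0, none)).1 == 0) = true := by
    simp only [beq_iff_eq]
    omega
  simp [this]
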